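-- pv_equiv track=rewrite | github.com/Laladj/infoPCSI | LALDJEE- DM4.py | plus_grand_produit_successif
-- ===== SOURCE A (Python) =====
-- def plus_grand_produit_successif(ch, p):
--
--     max_produit = 0  # Le plus grand produit trouvé
--     produit = 1      # élément neutre du produit
--     nb_sans_zeros = 0  # Nombre de chiffres non nuls consécutifs dans
--                         #la fenêtre
--     en_construction = True  # Indique si le produit est valide ou doit
--                             #être reconstruit
--
--
--     for i in range(len(ch)):
--         chiffre = int(ch[i])  # Convertit le caractère en entier
--
--         if chiffre == 0:
--
--             en_construction = False
--             produit = 1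
--             nb_sans_zeros = 0
--         else:
--
--             produit *= chiffre
--             nb_sans_zeros += 1
--
--
--         if nb_sans_zeros > p:
--
--             produit //= int(ch[i - p]) # division entière avec affectation
--
--         if nb_sans_zeros >= p and en_construction:
--
--             max_produit = max(max_produit, produit)
--         elif nb_sans_zeros >= p:
--
--             en_construction = True
--             max_produit = max(max_produit, produit)
--
--     return max_produit
-- ===== SOURCE B (Python) =====
-- def plus_grand_produit_successif(ch, p):
--     chiffres = [int(c) for c in ch]
--     best = 0
--     for i in range(len(chiffres) - p + 1):
--         fenetre = chiffres[i:i + p]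
--         if 0 in fenetre:
--             continue
--         produit = 1
--         for c in fenetre:
--             produit *= c
--         best = max(best, produit)
--     return best
-- ===== Notes on version B (the rewrite author's own statement) =====
-- stated objective: simpler
-- what changed: Replaces A's single-pass sliding-window state machine (running product maintained by multiply/floor-divide, a consecutive-nonzero counter and a validity flag) by a plain brute force: convert the string to a digit list once, enumerate every window of p consecutive digits by start index, skip windows containing 0, recompute each window's product from scratch and take the max.
-- intended difference: On the empty string with p=0 A returns 0 while B returns 1; the empty window exists even in the empty string and its (empty) product is 1, matching A's own value 1 for p=0 on every nonempty string, so B's is the intended value. — e.g. on plus_grand_produit_successif("", 0): A returns 0, B returns 1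
-- outside the precondition, e.g. on plus_grand_produit_successif('', -1): A returns 0, B returns 1
import Mathlib
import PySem

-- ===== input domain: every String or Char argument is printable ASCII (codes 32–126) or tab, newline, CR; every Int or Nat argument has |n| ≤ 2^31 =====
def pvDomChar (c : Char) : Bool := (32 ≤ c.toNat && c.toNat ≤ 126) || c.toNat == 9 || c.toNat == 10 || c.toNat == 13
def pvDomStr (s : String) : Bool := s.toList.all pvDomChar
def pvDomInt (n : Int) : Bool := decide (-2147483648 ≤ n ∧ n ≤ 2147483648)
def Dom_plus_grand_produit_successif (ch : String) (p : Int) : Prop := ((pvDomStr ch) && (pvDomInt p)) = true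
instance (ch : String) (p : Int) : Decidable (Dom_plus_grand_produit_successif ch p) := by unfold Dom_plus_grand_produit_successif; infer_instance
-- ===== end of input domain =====

-- B replaces A's sliding-window state machine by a plain brute force over all windows (simpler, not faster).

set_option maxRecDepth 100000


-- ===== PORT A =====
-- int(c) for a single character c: exact for the digit characters '0'..'9' admitted by Pre_.
def pvDig (c : Char) : Int := (c.toNat : Int) - 48

-- one iteration of A's for-loop; state = (max_produit, produit, nb_sans_zeros, en_construction).
-- pyGetD's default is only reached where Python would raise IndexError (outside Pre_).
def aStep (xs : List Char) (p : Int) : (Int × Int × Int × Bool) → Int → (Int × Int × Int × Bool)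
  | (maxp, produit, nb, enc), i =>
    let chiffre := pvDig (PySem.List.pyGetD xs i '0')
    let (produit, nb, enc) :=
      if chiffre = 0 then ((1 : Int), (0 : Int), false)
      else (produit * chiffre, nb + 1, enc)
    let produit :=
      if nb > p then PySem.Int.floordiv produit (pvDig (PySem.List.pyGetD xs (i - p) '0'))
      else produit
    if nb ≥ p ∧ enc = true then (max maxp produit, produit, nb, enc)
    else if nb ≥ p then (max maxp produit, produit, nb, true)
    else (maxp, produit, nb, enc)

def plus_grand_produit_successif (ch : String) (p : Int) : Int :=
  let xs := ch.toList
  ((PySem.List.pyRange 0 (xs.length : Int) 1).foldl (aStep xs p) (0, 1, 0, true)).1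

-- ===== PORT B =====
def plus_grand_produit_successif_alt (ch : String) (p : Int) : Int :=
  let chiffres := ch.toList.map pvDig
  (PySem.List.pyRange 0 ((chiffres.length : Int) - p + 1) 1).foldl
    (fun best i =>
      let fenetre := PySem.List.slice chiffres (some i) (some (i + p))
      if (0 : Int) ∈ fenetre then best
      else max best (fenetre.foldl (fun a c => a * c) 1)) 0

-- ===== PRECONDITION & SPEC =====
-- Pre_ excludes non-digit strings (int() raises ValueError) and negative p (A raises IndexError on
-- every nonempty string; on the empty string the loop never runs and A's 0 for a meaningless negative
-- window length is an accident B does not reproduce).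
def Pre_plus_grand_produit_successif (ch : String) (p : Int) : Prop :=
  ch.toList.all Char.isDigit = true ∧ 0 ≤ p
instance (ch : String) (p : Int) : Decidable (Pre_plus_grand_produit_successif ch p) := by
  unfold Pre_plus_grand_produit_successif; infer_instance

def pvWitness_plus_grand_produit_successif : String × Int := ("630529", 3)

-- On the empty string with p = 0, A returns 0 while B returns 1; the empty window exists even there
-- and its product is 1 (matching A's own 1 for p = 0 on nonempty strings), so B's value is intended.
def D_plus_grand_produit_successif (ch : String) (p : Int) : Prop := ch = "" ∧ p = 0
instance (ch : String) (p : Int) : Decidable (D_plus_grand_produit_successif ch p) := by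
  unfold D_plus_grand_produit_successif; infer_instance

def Spec_plus_grand_produit_successif (ch : String) (p : Int) (out : Int) : Prop :=
  ¬ D_plus_grand_produit_successif ch p → out = plus_grand_produit_successif_alt ch p
instance (ch : String) (p : Int) (out : Int) : Decidable (Spec_plus_grand_produit_successif ch p out) := by
  unfold Spec_plus_grand_produit_successif; infer_instance

def pvDiffWitness_plus_grand_produit_successif : String × Int := ("", 0)
def pvDiffWitnessOut_plus_grand_produit_successif : Int × Int := (0, 1)

-- ===== CLAIM =====
def Claim_unchanged_plus_grand_produit_successif : Prop := ∀ (ch : String) (p : Int), Dom_plus_grand_produit_successif ch p → Pre_plus_grand_produit_successif ch p → Spec_plus_grand_produit_successif ch p (plus_grand_produit_successif ch p)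
def Claim_changed_plus_grand_produit_successif : Prop := Dom_plus_grand_produit_successif (pvDiffWitness_plus_grand_produit_successif.1) (pvDiffWitness_plus_grand_produit_successif.2) ∧ Pre_plus_grand_produit_successif (pvDiffWitness_plus_grand_produit_successif.1) (pvDiffWitness_plus_grand_produit_successif.2) ∧ D_plus_grand_produit_successif (pvDiffWitness_plus_grand_produit_successif.1) (pvDiffWitness_plus_grand_produit_successif.2) ∧ plus_grand_produit_successif (pvDiffWitness_plus_grand_produit_successif.1) (pvDiffWitness_plus_grand_produit_successif.2) = pvDiffWitnessOut_plus_grand_produit_successif.1 ∧ plus_grand_produit_successif_alt (pvDiffWitness_plus_grand_produit_successif.1) (pvDiffWitness_plus_grand_produit_successif.2) = pvDiffWitnessOut_plus_grand_produit_successif.2 ∧ pvDiffWitnessOut_plus_grand_produit_successif.1 ≠ pvDiffWitnessOut_plus_grand_produit_successif.2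
def Claim_exact_plus_grand_produit_successif : Prop := ∀ (ch : String) (p : Int), Dom_plus_grand_produit_successif ch p → Pre_plus_grand_produit_successif ch p → D_plus_grand_produit_successif ch p → plus_grand_produit_successif ch p ≠ plus_grand_produit_successif_alt ch p

-- ===== LEMMAS AND PROOFS =====

-- product of the digits of a character window
def pvWProd (w : List Char) : Int := w.foldl (fun a c => a * pvDig c) 1
-- run length of trailing nonzero characters
def runL (xs : List Char) : Nat := (xs.reverse.takeWhile (fun c => c != '0')).length
-- last m elements
def lastN (xs : List Char) (m : Nat) : List Char := xs.drop (xs.length - m)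
-- value of A's en_construction flag after processing xs
def encL (xs : List Char) (q : Nat) : Bool := !(xs.contains '0') || decide (q ≤ runL xs)
-- best over windows ENDING at each processed position (A's enumeration)
def bestE (xs : List Char) (q : Nat) (m : Nat) : Int :=
  (List.range m).foldl (fun b k =>
    if q ≤ runL (xs.take (k+1)) then max b (pvWProd (lastN (xs.take (k+1)) q)) else b) 0
-- best over windows by START index (B's enumeration)
def bestS (xs : List Char) (q : Nat) : Int :=
  (List.range (xs.length + 1 - q)).foldl (fun b k =>
    let w := (xs.drop k).take q
    if '0' ∈ w then b else max b (pvWProd w)) 0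

theorem pvWProd_aux (w : List Char) : ∀ a : Int, w.foldl (fun a c => a * pvDig c) a = a * (w.map pvDig).prod := by
  induction w with
  | nil => intro a; simp
  | cons c w ih => intro a; simp [List.foldl_cons, ih, mul_assoc]

theorem pvWProd_eq (w : List Char) : pvWProd w = (w.map pvDig).prod := by
  simpa [pvWProd] using pvWProd_aux w 1

theorem pvWProd_append (w : List Char) (c : Char) : pvWProd (w ++ [c]) = pvWProd w * pvDig c := by
  simp [pvWProd_eq]

theorem pvWProd_cons (c : Char) (w : List Char) : pvWProd (c :: w) = pvDig c * pvWProd w := by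
  simp [pvWProd_eq]

theorem takeWhile_len_ge {α : Type} (P : α → Bool) : ∀ (l : List α) (q : Nat),
    q ≤ (l.takeWhile P).length ↔ q ≤ l.length ∧ ∀ x ∈ l.take q, P x = true := by
  intro l
  induction l with
  | nil => intro q; simp
  | cons a l ih =>
    intro q
    cases q with
    | zero => simp
    | succ q =>
      rw [List.takeWhile_cons]
      by_cases h : P a = true
      · rw [if_pos h]
        simp only [List.length_cons, List.take_succ_cons, List.mem_cons, Nat.add_le_add_iff_right]
        constructor
        · intro hq
          rcases (ih q).mp hq with ⟨h1, h2⟩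
          refine ⟨h1, fun x hx => ?_⟩
          rcases hx with rfl | hx
          · exact h
          · exact h2 x hx
        · intro ⟨h1, h2⟩
          exact (ih q).mpr ⟨h1, fun x hx => h2 x (Or.inr hx)⟩
      · rw [if_neg h]
        simp only [List.length_nil, List.length_cons, List.take_succ_cons, List.mem_cons]
        constructor
        · intro hq; omega
        · intro ⟨h1, h2⟩
          exact absurd (h2 a (Or.inl rfl)) h

theorem runL_le_length (t : List Char) : runL t ≤ t.length := by
  have h := (List.takeWhile_sublist (l := t.reverse) (fun c => c != '0')).length_le
  simpa [runL] using h

theorem lastN_reverse (t : List Char) (q : Nat) : (lastN t q).reverse = t.reverse.take (t.length - (t.length - q)) := by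
  rw [lastN, List.reverse_drop]

theorem mem_lastN_iff (t : List Char) (q : Nat) (h : q ≤ t.length) (x : Char) :
    x ∈ lastN t q ↔ x ∈ t.reverse.take q := by
  rw [← List.mem_reverse (as := lastN t q), lastN_reverse,
    show t.length - (t.length - q) = q from by omega]

theorem runL_ge_iff (t : List Char) (q : Nat) : q ≤ runL t ↔ q ≤ t.length ∧ '0' ∉ lastN t q := by
  rw [runL, takeWhile_len_ge]
  simp only [List.length_reverse]
  constructor
  · rintro ⟨h1, h2⟩
    refine ⟨h1, fun hm => ?_⟩
    have := h2 '0' ((mem_lastN_iff t q h1 '0').mp hm)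
    simp at this
  · rintro ⟨h1, h2⟩
    refine ⟨h1, fun x hx => ?_⟩
    have hne : x ≠ '0' := fun e => h2 (e ▸ (mem_lastN_iff t q h1 x).mpr hx)
    simpa using hne

theorem lastN_take (xs : List Char) (k q : Nat) (hk : k < xs.length) (hq : q ≤ k + 1) :
    lastN (xs.take (k+1)) q = (xs.drop (k+1-q)).take q := by
  rw [lastN, List.length_take, List.drop_take,
    show min (k+1) xs.length = k+1 from by omega,
    show k + 1 - (k + 1 - q) = q from by omega]

theorem cond_iff (xs : List Char) (k q : Nat) (hk : k < xs.length) :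
    (q ≤ runL (xs.take (k+1))) ↔ (q ≤ k + 1 ∧ '0' ∉ (xs.drop (k+1-q)).take q) := by
  rw [runL_ge_iff, List.length_take, show min (k+1) xs.length = k+1 from by omega]
  exact and_congr_right fun hq => by rw [lastN_take xs k q hk hq]

theorem foldl_id {α β : Type} (l : List α) (f : β → α → β) (b : β)
    (h : ∀ b x, x ∈ l → f b x = b) : l.foldl f b = b := by
  induction l generalizing b with
  | nil => rfl
  | cons a l ih =>
    rw [List.foldl_cons, h b a (List.mem_cons_self), ih]
    intro b x hx; exact h b x (List.mem_cons_of_mem a hx)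

theorem foldl_maxone (l : List Nat) (b : Int) :
    l.foldl (fun b _ => max b 1) b = if l = [] then b else max b 1 := by
  induction l generalizing b with
  | nil => rfl
  | cons a l ih =>
    rw [List.foldl_cons, ih]
    by_cases h : l = [] <;> simp [h]

theorem digit_bounds (c : Char) (h : c.isDigit = true) : 48 ≤ c.toNat ∧ c.toNat ≤ 57 := by
  simp only [Char.isDigit, Bool.and_eq_true, decide_eq_true_eq] at h
  obtain ⟨h1, h2⟩ := h
  exact ⟨by exact_mod_cast UInt32.le_iff_toNat_le.mp h1,
    by exact_mod_cast UInt32.le_iff_toNat_le.mp h2⟩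

theorem char_eq_of_toNat (c : Char) (h : c.toNat = 48) : c = '0' := by
  apply Char.ext
  apply UInt32.toNat_inj.mp
  simpa using h

theorem runL_append (t : List Char) (c : Char) :
    runL (t ++ [c]) = if c = '0' then 0 else runL t + 1 := by
  by_cases h : c = '0' <;> simp [runL, h]

theorem lastN_zero (t : List Char) : lastN t 0 = [] := by simp [lastN]

theorem lastN_append_succ (t : List Char) (c : Char) (m : Nat) :
    lastN (t ++ [c]) (m + 1) = lastN t m ++ [c] := by
  rw [lastN, lastN, List.length_append,
    show t.length + [c].length - (m + 1) = t.length - m from by simp,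
    List.drop_append_of_le_length (by omega)]

theorem dig_zero_iff (c : Char) (h : c.isDigit = true) : pvDig c = 0 ↔ c = '0' := by
  constructor
  · intro h0
    exact char_eq_of_toNat c (by unfold pvDig at h0; omega)
  · intro h0; subst h0; rfl

theorem dig_pos (c : Char) (h : c.isDigit = true) (h0 : c ≠ '0') : 0 < pvDig c := by
  have hb := digit_bounds c h
  have h48 : c.toNat ≠ 48 := fun e => h0 (char_eq_of_toNat c e)
  unfold pvDig
  omega

theorem lastN_nonzero (t : List Char) (q : Nat) (h : q ≤ runL t) : '0' ∉ lastN t q :=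
  ((runL_ge_iff t q).mp h).2

theorem floordiv_cancel (h x : Int) (hh : 0 < h) : PySem.Int.floordiv (h * x) h = x := by
  rw [PySem.Int.floordiv_eq_iff_of_pos hh]
  constructor
  · nlinarith
  · nlinarith

theorem lastN_head (t : List Char) (q : Nat) (hq1 : 1 ≤ q) (hql : q ≤ t.length) :
    lastN t q = t[t.length - q]'(by omega) :: lastN t (q - 1) := by
  rw [lastN, List.drop_eq_getElem_cons (by omega : t.length - q < t.length), lastN,
    show t.length - q + 1 = t.length - (q - 1) from by omega]

theorem bestE_succ (xs : List Char) (q m : Nat) :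
    bestE xs q (m + 1) = (if q ≤ runL (xs.take (m+1))
      then max (bestE xs q m) (pvWProd (lastN (xs.take (m+1)) q)) else bestE xs q m) := by
  unfold bestE
  rw [List.range_succ, List.foldl_append, List.foldl_cons, List.foldl_nil]

theorem aStep_char (xs : List Char) (hd : ∀ c ∈ xs, c.isDigit = true) (q m : Nat)
    (hm : m < xs.length) (best : Int) :
    aStep xs (q : Int)
      (best, pvWProd (lastN (xs.take m) (min (runL (xs.take m)) q)),
        ((runL (xs.take m) : Nat) : Int), encL (xs.take m) q) ((m : Nat) : Int)
    = ((if q ≤ runL (xs.take (m+1))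
          then max best (pvWProd (lastN (xs.take (m+1)) q)) else best),
       pvWProd (lastN (xs.take (m+1)) (min (runL (xs.take (m+1))) q)),
       ((runL (xs.take (m+1)) : Nat) : Int), encL (xs.take (m+1)) q) := by
  have hget : PySem.List.pyGetD xs ((m : Nat) : Int) '0' = xs[m] := by
    rw [PySem.List.pyGetD_natCast, List.getD_eq_getElem _ _ hm]
  have htlen : (xs.take m).length = m := by simp; omega
  have htake : xs.take (m+1) = xs.take m ++ [xs[m]] := List.take_succ_eq_append_getElem hm
  have hcd : xs[m].isDigit = true := hd _ (List.getElem_mem hm)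
  have hrlen : runL (xs.take m) ≤ m := by
    have h := runL_le_length (xs.take m); rw [htlen] at h; exact h
  unfold aStep
  simp only [hget]
  by_cases hc : xs[m] = '0'
  · -- chiffre == 0
    rw [if_pos ((dig_zero_iff _ hcd).mpr hc), htake, runL_append, if_pos hc]
    simp only []
    rw [if_neg (show ¬((0:Int) > (q:Int)) from by omega)]
    rw [if_neg (show ¬((0:Int) ≥ (q:Int) ∧ (false = true)) from by simp)]
    by_cases hq0 : q = 0
    · subst hq0
      rw [if_pos (show (0:Int) ≥ ((0:Nat):Int) from by omega)]
      simp [lastN_zero, pvWProd, encL]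
    · rw [if_neg (show ¬((0:Int) ≥ (q:Int)) from by omega)]
      simp [lastN_zero, pvWProd, encL, show ¬(q ≤ 0) from by omega]
      exact ⟨by rw [htake]; exact List.mem_append.mpr (Or.inr (by simp [hc])),
        by rw [htake, runL_append, if_pos hc]; omega⟩
  · -- chiffre != 0
    have hdig0 : pvDig xs[m] ≠ 0 := fun e => hc ((dig_zero_iff _ hcd).mp e)
    have hdpos : 0 < pvDig xs[m] := dig_pos _ hcd hc
    rw [if_neg hdig0, htake, runL_append, if_neg hc]
    simp only []
    by_cases hrq : q ≤ runL (xs.take m)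
    · -- window full: division fires
      have hqm : q ≤ m := le_trans hrq hrlen
      rw [if_pos (show ((runL (xs.take m) : Int) + 1 > (q:Int)) from by omega)]
      rw [show ((m:Int) - (q:Int)) = (((m - q : Nat)):Int) from by omega,
        PySem.List.pyGetD_natCast, List.getD_eq_getElem _ _ (show m - q < xs.length from by omega)]
      rw [min_eq_right hrq]
      by_cases hq0 : q = 0
      · subst hq0
        simp only [lastN_zero, Nat.sub_zero]
        rw [show pvWProd ([] : List Char) * pvDig xs[m] = pvDig xs[m] * 1 from by simp [pvWProd],
          floordiv_cancel _ _ hdpos]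
        rw [if_pos (show ((runL (xs.take m) : Int) + 1 ≥ ((0:Nat):Int) ∧ encL (xs.take m) 0 = true)
          from ⟨by push_cast; omega, by simp [encL]⟩)]
        simp [lastN_zero, pvWProd, encL]
      · -- q >= 1
        have hq1 : 1 ≤ q := by omega
        have hlast : lastN (xs.take m) q = xs[m - q] :: lastN (xs.take m) (q - 1) := by
          rw [lastN_head (xs.take m) q hq1 (by omega)]
          congr 1
          rw [List.getElem_take]
          congr 1
          omega
        have hmem : xs[m - q] ∈ lastN (xs.take m) q := by rw [hlast]; exact List.mem_cons_self
        have hh0 : xs[m - q] ≠ '0' := fun e => lastN_nonzero _ q hrq (e ▸ hmem)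
        have hhd : xs[m - q].isDigit = true := hd _ (List.getElem_mem (by omega))
        have hhpos : 0 < pvDig xs[m - q] := dig_pos _ hhd hh0
        rw [hlast, pvWProd_cons, mul_assoc, floordiv_cancel _ _ hhpos,
          ← pvWProd_append, ← lastN_append_succ, show q - 1 + 1 = q from by omega]
        rw [min_eq_right (show q ≤ runL (xs.take m) + 1 from by omega)]
        rcases Bool.eq_false_or_eq_true (encL (xs.take m) q) with henc | henc <;> rw [henc]
        · rw [if_pos ⟨show ((runL (xs.take m) : Int) + 1 ≥ (q:Int)) from by omega, rfl⟩]
          simp [encL, show q ≤ runL (xs.take m) + 1 from by omega]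
          all_goals exact Or.inr (by rw [htake, runL_append, if_neg hc]; omega)
        · rw [if_neg (by simp), if_pos (show ((runL (xs.take m) : Int) + 1 ≥ (q:Int)) from by omega)]
          simp [encL, show q ≤ runL (xs.take m) + 1 from by omega]
          all_goals exact Or.inr (by rw [htake, runL_append, if_neg hc]; omega)
    · -- window not yet full: no division
      have hrq' : runL (xs.take m) < q := by omega
      rw [if_neg (show ¬((runL (xs.take m) : Int) + 1 > (q:Int)) from by omega)]
      rw [min_eq_left (show runL (xs.take m) ≤ q from by omega)]
      rw [show pvWProd (lastN (xs.take m) (runL (xs.take m))) * pvDig xs[m]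
          = pvWProd (lastN (xs.take m ++ [xs[m]]) (runL (xs.take m) + 1)) from by
        rw [lastN_append_succ, pvWProd_append]]
      rw [min_eq_left (show runL (xs.take m) + 1 ≤ q from by omega)]
      by_cases hq : q = runL (xs.take m) + 1
      · rcases Bool.eq_false_or_eq_true (encL (xs.take m) q) with henc | henc <;> rw [henc]
        · rw [if_pos ⟨show ((runL (xs.take m) : Int) + 1 ≥ (q:Int)) from by omega, rfl⟩]
          simp [encL, show q ≤ runL (xs.take m) + 1 from by omega]
          exact ⟨by rw [hq], Or.inr (by rw [htake, runL_append, if_neg hc]; omega)⟩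
        · rw [if_neg (by simp), if_pos (show ((runL (xs.take m) : Int) + 1 ≥ (q:Int)) from by omega)]
          simp [encL, show q ≤ runL (xs.take m) + 1 from by omega]
          exact ⟨by rw [hq], Or.inr (by rw [htake, runL_append, if_neg hc]; omega)⟩
      · have hgt : runL (xs.take m) + 1 < q := by omega
        rw [if_neg (show ¬(((runL (xs.take m) : Int) + 1 ≥ (q:Int)) ∧ (encL (xs.take m) q = true)) from
            fun ⟨h1, _⟩ => by omega),
          if_neg (show ¬((runL (xs.take m) : Int) + 1 ≥ (q:Int)) from by omega)]
        have h1 : ('0' ∈ List.take (m+1) xs) ↔ ('0' ∈ List.take m xs) := by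
          rw [htake, List.mem_append]
          simp
          intro e; exact absurd e.symm hc
        have h2 : ¬(q ≤ runL (List.take (m+1) xs)) := by
          rw [htake, runL_append, if_neg hc]; omega
        simp [encL, h1, h2, show ¬(q ≤ runL (xs.take m) + 1) from by omega,
          show ¬(q ≤ runL (xs.take m)) from by omega]

theorem inv_lemma (xs : List Char) (hd : ∀ c ∈ xs, c.isDigit) (q m : Nat) (hm : m ≤ xs.length) :
    (List.range m).foldl (fun s (k : Nat) => aStep xs (q : Int) s (k : Int)) (0, 1, 0, true)
      = (bestE xs q m,
         pvWProd (lastN (xs.take m) (min (runL (xs.take m)) q)),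
         ((runL (xs.take m) : Nat) : Int),
         encL (xs.take m) q) := by
  induction m with
  | zero => simp [bestE, lastN, runL, encL, pvWProd]
  | succ m ih =>
    rw [List.range_succ, List.foldl_append, ih (by omega), List.foldl_cons, List.foldl_nil,
      aStep_char xs hd q m (by omega), bestE_succ]

theorem bestE_eq_bestS (xs : List Char) (q : Nat) (h : ¬(xs = [] ∧ q = 0)) :
    bestE xs q xs.length = bestS xs q := by
  by_cases hq : q = 0
  · subst hq
    have hne : xs ≠ [] := fun e => h ⟨e, rfl⟩
    have hE : bestE xs 0 xs.length = (List.range xs.length).foldl (fun (b : Int) _ => max b 1) 0 := by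
      unfold bestE
      refine PySem.List.foldl_congr_mem _ _ _ _ ?_
      intro b k _
      rw [if_pos (Nat.zero_le _), show lastN (xs.take (k+1)) 0 = [] from by simp [lastN]]
      rfl
    have hS : bestS xs 0 = (List.range (xs.length + 1)).foldl (fun (b : Int) _ => max b 1) 0 := by
      unfold bestS
      refine PySem.List.foldl_congr_mem _ _ _ _ ?_
      intro b k _
      simp [pvWProd]
    rw [hE, hS, foldl_maxone, foldl_maxone]
    have h1 : List.range xs.length ≠ [] := by
      simp [List.range_eq_nil, List.length_eq_zero_iff]
      intro e; exact hne e
    have h2 : List.range (xs.length + 1) ≠ [] := by simp [List.range_eq_nil]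
    rw [if_neg h1, if_neg h2]
  · have hq1 : 1 ≤ q := by omega
    have step1 : bestE xs q xs.length = (List.range xs.length).foldl
        (fun (b : Int) (k : Nat) =>
          if q ≤ k + 1 ∧ '0' ∉ (xs.drop (k+1-q)).take q
          then max b (pvWProd ((xs.drop (k+1-q)).take q)) else b) 0 := by
      unfold bestE
      refine PySem.List.foldl_congr_mem _ _ _ _ ?_
      intro b k hk
      have hklt : k < xs.length := List.mem_range.mp hk
      by_cases hc : q ≤ k + 1
      · rw [lastN_take xs k q hklt hc, if_congr (cond_iff xs k q hklt) rfl rfl]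
      · rw [if_neg (by rw [cond_iff xs k q hklt]; intro ⟨h1, _⟩; exact hc h1),
          if_neg (by intro ⟨h1, _⟩; exact hc h1)]
    rw [step1]
    unfold bestS
    rcases Nat.lt_or_ge xs.length q with hlt | hge
    · rw [show xs.length + 1 - q = 0 from by omega]
      simp only [List.range_zero, List.foldl_nil]
      refine foldl_id _ _ _ ?_
      intro b k hk
      have hklt : k < xs.length := List.mem_range.mp hk
      rw [if_neg]; intro ⟨h1, _⟩; omega
    · conv_lhs => rw [show xs.length = (q - 1) + (xs.length + 1 - q) from by omega, List.range_add,
        List.foldl_append]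
      rw [foldl_id (List.range (q-1)) _ 0 (by
        intro b k hk
        have hklt : k < q - 1 := List.mem_range.mp hk
        rw [if_neg]; intro ⟨h1, _⟩; omega)]
      rw [List.foldl_map]
      refine PySem.List.foldl_congr_mem _ _ _ _ ?_
      intro b j _
      rw [show q - 1 + j + 1 - q = j from by omega]
      have ht : q ≤ q - 1 + j + 1 := by omega
      simp [ht]

theorem A_eq (ch : String) (p : Int) (hd : ch.toList.all Char.isDigit = true) (hp : 0 ≤ p)
    (hD : ¬ D_plus_grand_produit_successif ch p) :
    plus_grand_produit_successif ch p = plus_grand_produit_successif_alt ch p := by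
  have hdm : ∀ c ∈ ch.toList, c.isDigit := by simpa [List.all_eq_true] using hd
  obtain ⟨q, rfl⟩ : ∃ q : Nat, p = (q : Int) := ⟨p.toNat, by omega⟩
  unfold plus_grand_produit_successif plus_grand_produit_successif_alt
  dsimp only
  rw [PySem.List.pyRange_one, PySem.List.pyRange_one]
  simp only [Int.sub_zero, zero_add]
  have h1 : ((ch.toList.length : Int)).toNat = ch.toList.length := by omega
  have h2 : (((ch.toList.map pvDig).length : Int)) - (q:Int) + 1
      = ((ch.toList.length : Int)) - (q:Int) + 1 := by simp
  have h3 : (((ch.toList.length : Int)) - (q:Int) + 1).toNat = ch.toList.length + 1 - q := by omega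
  rw [h1, h2, h3]
  simp only [List.foldl_map]
  rw [inv_lemma ch.toList hdm q ch.toList.length le_rfl]
  have hcond : ¬(ch.toList = [] ∧ q = 0) := by
    intro ⟨hnil, hq0⟩
    exact hD ⟨String.toList_eq_nil_iff.mp hnil, by omega⟩
  rw [bestE_eq_bestS ch.toList q hcond]
  unfold bestS
  refine PySem.List.foldl_congr_mem _ _ _ _ ?_
  intro b k _
  rw [PySem.List.slice_natCast_add, ← List.map_drop, ← List.map_take]
  have hw : ∀ c ∈ (ch.toList.drop k).take q, c.isDigit := fun c hc =>
    hdm c (List.mem_of_mem_drop (List.mem_of_mem_take hc))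
  have hmem : ((0 : Int) ∈ ((ch.toList.drop k).take q).map pvDig)
      ↔ '0' ∈ (ch.toList.drop k).take q := by
    simp only [List.mem_map]
    constructor
    · rintro ⟨c, hc, h0⟩
      exact ((dig_zero_iff c (hw c hc)).mp h0) ▸ hc
    · intro h; exact ⟨'0', h, rfl⟩
  show (if '0' ∈ (ch.toList.drop k).take q then b
      else max b (pvWProd ((ch.toList.drop k).take q))) = _
  rw [List.foldl_map]
  by_cases h0 : '0' ∈ (ch.toList.drop k).take q
  · rw [if_pos h0, if_pos (hmem.mpr h0)]
  · rw [if_neg h0, if_neg (fun hh => h0 (hmem.mp hh))]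
    rfl

-- ===== VERDICT =====
theorem plus_grand_produit_successif_spec : Claim_unchanged_plus_grand_produit_successif := by
  intro ch p _ hpre hD
  exact A_eq ch p hpre.1 hpre.2 hD

theorem plus_grand_produit_successif_changed : Claim_changed_plus_grand_produit_successif := by
  unfold Claim_changed_plus_grand_produit_successif; decide

theorem plus_grand_produit_successif_tight : Claim_exact_plus_grand_produit_successif := by
  intro ch p _ _ hd
  obtain ⟨h1, h2⟩ := hd
  subst h1; subst h2; decide
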